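-- pv_equiv track=rewrite | github.com/Kir4kami/Multi-Process-NS3-Experiment | scratch/TrafficGenerator/trafficGen.py | get_host_list_dp
-- ===== SOURCE A (Python) =====
-- def get_host_list_dp(host_num, dp):
--     if host_num % dp != 0:
--         raise ValueError(f"host_num {host_num} 无法被 dp {dp} 整除")
--     span = host_num // dp
--     host_list = []
--     for start in range(0, span):
--         host_ids = [host_id for host_id in range(start, host_num, span)]
--         host_list.append(host_ids)
--     return host_list
-- ===== SOURCE B (Python) =====
-- def get_host_list_dp(host_num, dp):
--     if host_num % dp != 0:
--         raise ValueError(f"host_num {host_num} 无法被 dp {dp} 整除")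
--     span = host_num // dp
--     buckets = [[] for _ in range(span)]
--     for host_id in range(host_num):
--         buckets[host_id % span].append(host_id)
--     return buckets
-- ===== Notes on version B (the rewrite author's own statement) =====
-- stated objective: alternative
-- what changed: B replaces A's per-group gather (an outer loop over the span groups, each built by a strided inner range) with a single scatter pass over all host ids that appends each id to its modulo bucket.
-- outside the precondition, e.g. on get_host_list_dp(2, -1): A returns [], B raises IndexError
import Mathlib
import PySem

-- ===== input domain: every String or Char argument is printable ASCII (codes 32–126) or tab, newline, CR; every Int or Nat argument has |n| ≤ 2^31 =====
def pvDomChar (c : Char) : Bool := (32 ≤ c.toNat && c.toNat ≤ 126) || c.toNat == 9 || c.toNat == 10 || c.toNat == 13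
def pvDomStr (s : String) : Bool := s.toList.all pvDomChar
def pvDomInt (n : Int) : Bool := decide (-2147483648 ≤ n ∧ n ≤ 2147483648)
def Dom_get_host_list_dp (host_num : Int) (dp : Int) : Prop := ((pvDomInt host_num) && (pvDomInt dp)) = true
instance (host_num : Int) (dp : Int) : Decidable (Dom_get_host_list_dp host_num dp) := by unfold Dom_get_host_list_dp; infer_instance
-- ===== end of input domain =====

-- B replaces A's per-group gather (an outer loop over groups, each built by a strided range)
-- with a single scatter pass appending each host id to its modulo bucket; objective: alternative.

-- ===== PORT A =====
-- A's raise branch (ZeroDivisionError on dp = 0, ValueError when host_num % dp ≠ 0) is excluded by Pre_.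
def get_host_list_dp (host_num : Int) (dp : Int) : List (List Int) :=
  let span := PySem.Int.floordiv host_num dp
  (PySem.List.pyRange 0 span 1).foldl
    (fun host_list start => host_list ++ [PySem.List.pyRange start host_num span]) []

-- ===== PORT B =====
-- buckets[host_id % span].append(host_id): the Python index is nonnegative on Pre_, so .toNat is exact there.
def get_host_list_dp_alt (host_num : Int) (dp : Int) : List (List Int) :=
  let span := PySem.Int.floordiv host_num dp
  let buckets : List (List Int) := (PySem.List.pyRange 0 span 1).map (fun _ => [])
  (PySem.List.pyRange 0 host_num 1).foldl
    (fun bs host_id => bs.modify (PySem.Int.mod host_id span).toNat (· ++ [host_id])) buckets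

-- ===== PRECONDITION & SPEC =====
-- Pre_ excludes the inputs where A raises (dp = 0: ZeroDivisionError; host_num % dp ≠ 0: ValueError),
-- and the inputs with host_num > 0 and dp < 0, where A returns a value only because its loop body never
-- runs while B's scatter itself raises IndexError (span is negative, so there are no buckets).
def Pre_get_host_list_dp (host_num : Int) (dp : Int) : Prop :=
  dp ≠ 0 ∧ PySem.Int.mod host_num dp = 0 ∧ (host_num ≤ 0 ∨ 0 < dp)
instance (host_num : Int) (dp : Int) : Decidable (Pre_get_host_list_dp host_num dp) := by
  unfold Pre_get_host_list_dp; infer_instance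
def pvWitness_get_host_list_dp : Int × Int := (6, 3)
def Spec_get_host_list_dp (host_num : Int) (dp : Int) (out : List (List Int)) : Prop := out = get_host_list_dp_alt host_num dp
instance (host_num : Int) (dp : Int) (out : List (List Int)) : Decidable (Spec_get_host_list_dp host_num dp out) := by unfold Spec_get_host_list_dp; infer_instance

-- ===== CLAIM (what is proved, stated in full; the proofs are below) =====
def Claim_equal_get_host_list_dp : Prop := ∀ (host_num : Int) (dp : Int), Dom_get_host_list_dp host_num dp → Pre_get_host_list_dp host_num dp → Spec_get_host_list_dp host_num dp (get_host_list_dp host_num dp)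

-- ===== LEMMAS AND PROOFS =====

-- A's loop shape: appending singletons is a map.
theorem foldl_append_singleton {α β : Type} (g : α → β) (xs : List α) (init : List β) :
    xs.foldl (fun acc x => acc ++ [g x]) init = init ++ xs.map g := by
  induction xs generalizing init with
  | nil => simp
  | cons x xs ih => simp [List.foldl_cons, ih]

theorem map_range_modify {α : Type} (s t : Nat) (_ht : t < s) (f : Nat → α) (g : α → α) :
    ((List.range s).map f).modify t g = (List.range s).map (fun j => if j = t then g (f j) else f j) := by
  apply List.ext_getElem
  · simp [List.length_modify]
  · intro i h1 h2
    simp only [List.getElem_modify, List.getElem_map, List.getElem_range]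
    by_cases hit : t = i
    · subst hit; simp
    · rw [if_neg hit, if_neg (fun h => hit h.symm)]

-- One chunk [k*s, k*s+t) scattered onto buckets built over List.range s.
theorem scatter_chunk (s k : Nat) (f : Nat → List Int) (t : Nat) (ht : t ≤ s) :
    (PySem.List.pyRange ((k*s : Nat) : Int) ((k*s + t : Nat) : Int) 1).foldl
        (fun bs i => bs.modify (PySem.Int.mod i (s : Int)).toNat (· ++ [i]))
        ((List.range s).map f)
      = (List.range s).map (fun j => f j ++ if j < t then [((k*s + j : Nat) : Int)] else []) := by
  induction t with
  | zero =>
    rw [PySem.List.pyRange_one_eq_nil (by omega)]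
    simp
  | succ t ih =>
    have e1 : ((k*s + (t+1) : Nat) : Int) = ((k*s + t : Nat) : Int) + 1 := by push_cast; ring
    rw [e1, PySem.List.pyRange_one_succ_right (by exact_mod_cast Nat.le_add_right (k*s) t),
        List.foldl_append, ih (by omega)]
    have hmod : (PySem.Int.mod ((k*s + t : Nat) : Int) (s : Int)).toNat = t := by
      rw [PySem.Int.mod_natCast]
      have : (k*s + t) % s = t := by
        rw [Nat.add_comm, Nat.add_mul_mod_self_right]
        exact Nat.mod_eq_of_lt (by omega)
      simp [this]
    simp only [List.foldl_cons, List.foldl_nil]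
    rw [hmod, map_range_modify s t (by omega)]
    apply List.map_congr_left
    intro j hj
    have hjs : j < s := List.mem_range.mp hj
    by_cases hjt : j = t
    · subst hjt
      simp
    · simp [hjt, show (j < t+1) ↔ j < t by omega]

-- The whole scatter: d blocks of size s.
theorem scatter_blocks (s d : Nat) (_hs : 0 < s) :
    (PySem.List.pyRange 0 ((d*s : Nat) : Int) 1).foldl
        (fun bs i => bs.modify (PySem.Int.mod i (s : Int)).toNat (· ++ [i]))
        ((List.range s).map (fun _ => ([] : List Int)))
      = (List.range s).map (fun j => (List.range d).map (fun r => ((r*s + j : Nat) : Int))) := by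
  induction d with
  | zero =>
    rw [show ((0*s : Nat) : Int) = 0 by push_cast; ring, PySem.List.pyRange_one_eq_nil (by omega)]
    simp
  | succ d ih =>
    have e1 : (((d+1)*s : Nat) : Int) = ((d*s + s : Nat) : Int) := by push_cast; ring
    rw [e1, PySem.List.pyRange_one_append 0 ((d*s : Nat) : Int) ((d*s + s : Nat) : Int)
          (by positivity) (by exact_mod_cast Nat.le_add_right (d*s) s),
        List.foldl_append, ih,
        scatter_chunk s d (fun j => (List.range d).map (fun r => ((r*s + j : Nat) : Int))) s (le_refl s)]
    apply List.map_congr_left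
    intro j hj
    have hjs : j < s := List.mem_range.mp hj
    rw [if_pos hjs, List.range_succ, List.map_append]
    simp

-- A's gather, rewritten to the same normal form.
theorem gather_eq (s d : Nat) (hs : 0 < s) (hd : 0 < d) :
    (PySem.List.pyRange 0 (s : Int) 1).foldl
        (fun hl st => hl ++ [PySem.List.pyRange st ((d*s : Nat) : Int) (s : Int)]) []
      = (List.range s).map (fun j => (List.range d).map (fun r => ((r*s + j : Nat) : Int))) := by
  rw [foldl_append_singleton, List.nil_append, PySem.List.pyRange_one, List.map_map]
  rw [show ((s : Int) - 0).toNat = s by omega]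
  apply List.map_congr_left
  intro j hj
  have hjs : j < s := List.mem_range.mp hj
  simp only [Function.comp]
  rw [show ((0 : Int) + (j : Nat)) = ((j : Nat) : Int) by ring]
  rw [PySem.List.pyRange_of_pos _ _ (by exact_mod_cast hs)]
  have hlt : ((j : Nat) : Int) < ((d*s : Nat) : Int) := by
    have h2 : j < d*s := lt_of_lt_of_le hjs (Nat.le_mul_of_pos_left s hd)
    exact_mod_cast h2
  have hcnt : ((((d*s : Nat) : Int) - ((j : Nat) : Int) + (s : Int) - 1) / (s : Int)).toNat = d := by
    have h1 : (((d*s : Nat) : Int) - ((j : Nat) : Int) + (s : Int) - 1)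
        = ((s - 1 - j : Nat) : Int) + ((d : Nat) : Int) * (s : Int) := by push_cast; omega
    rw [h1, Int.add_mul_ediv_right _ _ (by exact_mod_cast hs.ne')]
    have h2 : (((s - 1 - j : Nat) : Int)) / (s : Int) = 0 :=
      Int.ediv_eq_zero_of_lt (by positivity) (by exact_mod_cast Nat.sub_lt_of_lt (by omega))
    rw [h2]
    omega
  rw [if_pos hlt, hcnt]
  apply List.map_congr_left
  intro r hr
  push_cast; ring

-- ===== VERDICT (by name: the statement is the Claim_ definition above) =====
theorem get_host_list_dp_spec : Claim_equal_get_host_list_dp := by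
  intro host_num dp _ hpre
  obtain ⟨hdp, hmod, hsign⟩ := hpre
  have hprod : PySem.Int.floordiv host_num dp * dp = host_num := by
    have h := PySem.Int.floordiv_mul_add_mod host_num dp
    rw [hmod, add_zero] at h; exact h
  unfold Spec_get_host_list_dp
  show (PySem.List.pyRange 0 (PySem.Int.floordiv host_num dp) 1).foldl
      (fun host_list start => host_list ++ [PySem.List.pyRange start host_num (PySem.Int.floordiv host_num dp)]) []
    = (PySem.List.pyRange 0 host_num 1).foldl
      (fun bs host_id => bs.modify (PySem.Int.mod host_id (PySem.Int.floordiv host_num dp)).toNat (· ++ [host_id]))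
      ((PySem.List.pyRange 0 (PySem.Int.floordiv host_num dp) 1).map (fun _ => []))
  set span := PySem.Int.floordiv host_num dp with hspan
  by_cases hpos : 0 < host_num
  · -- main case: dp > 0, span > 0, host_num = d*s
    have hdppos : 0 < dp := hsign.resolve_left (by omega)
    have hspanpos : 0 < span := by nlinarith
    set s := span.toNat with hs
    set d := dp.toNat with hd
    have hsc : (s : Int) = span := Int.toNat_of_nonneg (by omega)
    have hdc : (d : Int) = dp := Int.toNat_of_nonneg (by omega)
    have hhn : host_num = ((d*s : Nat) : Int) := by
      push_cast
      rw [hdc, hsc, mul_comm]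
      exact hprod.symm
    have hspos : 0 < s := by omega
    have hdpos : 0 < d := by omega
    have hbuckets : (PySem.List.pyRange 0 ((s : Nat) : Int) 1).map (fun _ => ([] : List Int))
        = (List.range s).map (fun _ => ([] : List Int)) := by
      rw [PySem.List.pyRange_one, List.map_map]
      rw [show (((s : Nat) : Int) - 0).toNat = s by omega]
      exact List.map_congr_left (fun _ _ => rfl)
    rw [hhn, ← hsc, hbuckets, gather_eq s d hspos hdpos, scatter_blocks s d hspos]
  · -- host_num ≤ 0: both sides are span-many empty buckets
    have hle : host_num ≤ 0 := by omega
    rw [PySem.List.pyRange_one_eq_nil hle, List.foldl_nil, foldl_append_singleton, List.nil_append]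
    apply List.map_congr_left
    intro st hst
    rw [PySem.List.mem_pyRange_one] at hst
    have hspanpos : 0 < span := by omega
    rw [PySem.List.pyRange_of_pos _ _ hspanpos, if_neg (by omega)]
    simp
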